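-- pv_equiv track=rewrite | github.com/VeriSnip/Open-Library | scripts/instantiate.py | find_most_similar_name
-- ===== SOURCE A (Python) =====
-- def find_most_similar_name(input_name, file_names):
--     input_words = input_name.split("_")
--     similar_word_counter = 0
--     most_similar_name = ""
--     for name in file_names:
--         tmp_counter = 0
--         tmp_string = ""
--         for word in input_words:
--             tmp_string = tmp_string + word
--             tmp_counter = tmp_counter + 1
--             if name.startswith(tmp_string):
--                 if tmp_counter > similar_word_counter:
--                     similar_word_counter = tmp_counter
--                     most_similar_name = tmp_string
--             tmp_string = tmp_string + "_"
--
--     return most_similar_name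
-- ===== SOURCE B (Python) =====
-- def _lcp(a, b):
--     n = 0
--     for x, y in zip(a, b):
--         if x != y:
--             break
--         n += 1
--     return n
--
--
-- def find_most_similar_name(input_name, file_names):
--     # longest common prefix of input_name with any file name
--     m = 0
--     for name in file_names:
--         i = _lcp(name, input_name)
--         if i > m:
--             m = i
--     # extend over whole words as long as the word boundary stays within m
--     words = input_name.split("_")
--     L = len(words[0])
--     if L > m:
--         return ""
--     for w in words[1:]:
--         step = L + 1 + len(w)
--         if step > m:
--             break
--         L = step
--     return input_name[:L]
-- ===== Notes on version B (the rewrite author's own statement) =====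
-- stated objective: faster
-- what changed: A rebuilds every word-prefix by repeated concatenation and calls startswith for each word of the input against each file name; B computes one longest-common-prefix length per file name, takes the maximum, and converts it to the longest word-boundary prefix with a single walk over the word lengths.
import Mathlib
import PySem

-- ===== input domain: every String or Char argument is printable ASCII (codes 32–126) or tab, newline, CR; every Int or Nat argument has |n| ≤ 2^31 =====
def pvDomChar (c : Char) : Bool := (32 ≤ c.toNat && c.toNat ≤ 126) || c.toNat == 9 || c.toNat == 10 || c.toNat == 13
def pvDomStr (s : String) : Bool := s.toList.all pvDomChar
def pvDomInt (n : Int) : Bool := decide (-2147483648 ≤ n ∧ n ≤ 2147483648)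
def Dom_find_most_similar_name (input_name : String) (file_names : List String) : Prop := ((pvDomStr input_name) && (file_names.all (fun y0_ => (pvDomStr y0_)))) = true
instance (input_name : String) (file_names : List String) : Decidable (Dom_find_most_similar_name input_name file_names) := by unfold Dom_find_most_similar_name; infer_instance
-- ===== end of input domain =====

-- B replaces A's per-name re-scan of every accumulated word-prefix (repeated concatenation +
-- startswith) by one longest-common-prefix scan per name followed by a single word-boundary
-- walk; objective: faster.

-- ===== PORT A =====
-- A-side helpers: the two nested loop bodies of A, as named fold steps (over List Char,
-- the PySem.Chars semantics of Python str).
def innerStepA (name : List Char) (st : Nat × List Char × Nat × List Char)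
    (word : List Char) : Nat × List Char × Nat × List Char :=
  let ts := st.2.1 ++ word
  let tc := st.1 + 1
  if PySem.Chars.startswith name ts then
    if st.2.2.1 < tc then (tc, ts ++ ['_'], tc, ts)
    else (tc, ts ++ ['_'], st.2.2)
  else (tc, ts ++ ['_'], st.2.2)

def nameStepA (input_words : List (List Char)) (acc : Nat × List Char)
    (name : List Char) : Nat × List Char :=
  (input_words.foldl (innerStepA name) (0, [], acc)).2.2

def find_most_similar_name (input_name : String) (file_names : List String) : String :=
  let input_words := PySem.Chars.splitOn input_name.toList ['_']
  String.ofList ((file_names.foldl (fun acc name => nameStepA input_words acc name.toList) (0, [])).2)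

-- ===== PORT B =====
-- port of Source B's _lcp: the zip loop with break, as recursion on the two char lists
def bLcp : List Char → List Char → Nat
  | x :: a, y :: b => if x = y then bLcp a b + 1 else 0
  | _, _ => 0

-- port of Source B's second loop (for w in words[1:] with break), carrying L
def bExtend (m L : Nat) : List (List Char) → Nat
  | [] => L
  | w :: ws => if m < L + 1 + w.length then L else bExtend m (L + 1 + w.length) ws

def maxStepB (s : List Char) (m : Nat) (name : List Char) : Nat :=
  let i := bLcp name s
  if m < i then i else m

def find_most_similar_name_alt (input_name : String) (file_names : List String) : String :=
  let s := input_name.toList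
  let m := file_names.foldl (fun acc name => maxStepB s acc name.toList) 0
  let words := PySem.Chars.splitOn s ['_']
  let L := words.headI.length   -- words[0]: split never returns an empty list, so headI is exact
  if m < L then ""
  else String.ofList (s.take (bExtend m L words.tail))  -- input_name[:L'] with 0 ≤ L' ≤ len: exact as take

-- ===== PRECONDITION & SPEC =====
def Spec_find_most_similar_name (input_name : String) (file_names : List String) (out : String) : Prop := out = find_most_similar_name_alt input_name file_names
instance (input_name : String) (file_names : List String) (out : String) : Decidable (Spec_find_most_similar_name input_name file_names out) := by unfold Spec_find_most_similar_name; infer_instance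

-- ===== CLAIM (what is proved, stated in full; the proofs are below) =====
def Claim_equal_find_most_similar_name : Prop := ∀ (input_name : String) (file_names : List String), Dom_find_most_similar_name input_name file_names → Spec_find_most_similar_name input_name file_names (find_most_similar_name input_name file_names)

-- ===== LEMMAS AND PROOFS =====


-- proof-side: a simple structural description of Python's str.split("_") and "_".join
def consHeadL (p : List Char) : List (List Char) → List (List Char)
  | [] => [p]
  | h :: t => (p ++ h) :: t

def sp : List Char → List (List Char)
  | [] => [[]]
  | c :: r => if c = '_' then [] :: sp r else consHeadL [c] (sp r)

def jn : List (List Char) → List Char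
  | [] => []
  | [w] => w
  | w :: vs => w ++ '_' :: jn vs

-- how many nested word-prefixes of the word list match into a name remainder
def matchCnt : List (List Char) → List Char → Nat
  | [], _ => 0
  | w :: vs, n =>
    if w.isPrefixOf n then
      1 + (match n.drop w.length with
           | '_' :: n3 => matchCnt vs n3
           | _ => 0)
    else 0

-- the number of words consumed by bExtend
def ccnt (m L : Nat) : List (List Char) → Nat
  | [] => 0
  | w :: vs => if m < L + 1 + w.length then 0 else ccnt m (L + 1 + w.length) vs + 1

-- the outer-loop invariant value: A's (counter, best) state as a function of the max lcp m
def Gfun (s w0 : List Char) (rest : List (List Char)) (m : Nat) : Nat × List Char :=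
  if m < w0.length then (0, [])
  else (ccnt m w0.length rest + 1, s.take (bExtend m w0.length rest))

theorem consHeadL_consHeadL (p q : List Char) (xs : List (List Char)) :
    consHeadL p (consHeadL q xs) = consHeadL (p ++ q) xs := by
  cases xs <;> simp [consHeadL]

theorem sp_ne_nil (s : List Char) : sp s ≠ [] := by
  cases s with
  | nil => simp [sp]
  | cons c r =>
    simp only [sp]
    split
    · simp
    · unfold consHeadL; split <;> simp_all

theorem consHeadL_nil {xs : List (List Char)} (h : xs ≠ []) : consHeadL [] xs = xs := by
  cases xs <;> simp_all [consHeadL]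

theorem go_eq_sp (l : List Char) : ∀ (fuel : Nat) (cur : List Char) (acc : List (List Char)),
    l.length < fuel →
    PySem.Chars.splitOn.go ['_'] fuel l cur acc = acc.reverse ++ consHeadL cur.reverse (sp l) := by
  induction l with
  | nil =>
    intro fuel cur acc h
    match fuel with
    | f + 1 => simp [PySem.Chars.splitOn.go, sp, consHeadL]
  | cons c r ih =>
    intro fuel cur acc h
    match fuel with
    | f + 1 =>
      by_cases hc : c = '_'
      · subst hc
        have : List.isPrefixOf ['_'] ('_' :: r) = true := by simp [List.isPrefixOf]
        simp only [PySem.Chars.splitOn.go, this, if_pos, List.length_singleton,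
          List.drop_succ_cons, List.drop_zero]
        rw [ih f [] (cur.reverse :: acc) (by simpa using h)]
        rw [show sp ('_' :: r) = [] :: sp r from by rw [sp]; simp]
        simp [consHeadL, consHeadL_nil (sp_ne_nil r)]
        cases hsp : sp r with
        | nil => exact absurd hsp (sp_ne_nil r)
        | cons hh tt => rfl
      · have : List.isPrefixOf ['_'] (c :: r) = false := by
          simp [List.isPrefixOf]
          exact fun hh => hc hh.symm
        simp only [PySem.Chars.splitOn.go, this]
        rw [if_neg (by simp), ih f (c :: cur) acc (by simpa using h)]
        simp [sp, hc, ← consHeadL_consHeadL]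

theorem splitOn_eq_sp (s : List Char) : PySem.Chars.splitOn s ['_'] = sp s := by
  unfold PySem.Chars.splitOn
  rw [go_eq_sp s (s.length + 1) [] [] (by omega)]
  simp [consHeadL_nil (sp_ne_nil s)]

theorem jn_cons {vs : List (List Char)} (w : List Char) (h : vs ≠ []) :
    jn (w :: vs) = w ++ '_' :: jn vs := by
  cases vs with
  | nil => simp at h
  | cons a t => rfl

theorem jn_consHeadL (p : List Char) {xs : List (List Char)} (h : xs ≠ []) :
    jn (consHeadL p xs) = p ++ jn xs := by
  match xs with
  | [w] => simp [consHeadL, jn]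
  | w :: a :: t => simp [consHeadL, jn]

theorem jn_sp (s : List Char) : jn (sp s) = s := by
  induction s with
  | nil => rfl
  | cons c r ih =>
    by_cases hc : c = '_'
    · subst hc
      rw [sp, if_pos rfl, jn_cons _ (sp_ne_nil r), ih]
      rfl
    · rw [sp, if_neg hc, jn_consHeadL [c] (sp_ne_nil r), ih]
      rfl

theorem bLcp_nil_right (a : List Char) : bLcp a [] = 0 := by
  cases a <;> rfl

theorem bLcp_append_same (p a b : List Char) :
    bLcp (p ++ a) (p ++ b) = p.length + bLcp a b := by
  induction p with
  | nil => simp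
  | cons x xs ih =>
    simp only [List.cons_append, bLcp, if_pos rfl, if_true, List.length_cons, ih]
    omega

theorem prefix_iff_le_bLcp (p a b : List Char) (hb : p <+: b) :
    p <+: a ↔ p.length ≤ bLcp a b := by
  induction p generalizing a b with
  | nil => simp
  | cons x p' ih =>
    obtain ⟨b', rfl⟩ := hb
    constructor
    · rintro ⟨a', rfl⟩
      simp only [List.cons_append, bLcp, if_pos rfl, if_true, List.length_cons]
      have := (ih (p' ++ a') (p' ++ b') (List.prefix_append p' b')).mp (List.prefix_append p' a')
      omega
    · intro h
      match a with
      | [] => simp [bLcp] at h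
      | y :: a' =>
        simp only [List.cons_append, bLcp] at h
        by_cases hxy : y = x
        · subst hxy
          rw [if_pos rfl] at h
          simp only [List.length_cons] at h
          have := (ih a' (p' ++ b') (List.prefix_append p' b')).mpr (by omega)
          exact List.cons_prefix_cons.mpr ⟨rfl, this⟩
        · rw [if_neg hxy] at h
          simp at h
        

theorem ccnt_mono {m m' : Nat} (h : m ≤ m') (L : Nat) (vs : List (List Char)) :
    ccnt m L vs ≤ ccnt m' L vs := by
  induction vs generalizing L with
  | nil => simp [ccnt]
  | cons w vs ih =>
    simp only [ccnt]
    split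
    · omega
    · rw [if_neg (by omega)]
      have := ih (L + 1 + w.length)
      omega

theorem ccnt_ne_nil {m L : Nat} {vs : List (List Char)} (h : ccnt m L vs ≠ 0) : vs ≠ [] := by
  cases vs
  · simp [ccnt] at h
  · simp

theorem bExtend_jn (vs : List (List Char)) : ∀ (m L : Nat),
    bExtend m L vs = if ccnt m L vs = 0 then L else L + 1 + (jn (vs.take (ccnt m L vs))).length := by
  induction vs with
  | nil => intro m L; simp [bExtend, ccnt]
  | cons w vs ih =>
    intro m L
    simp only [bExtend, ccnt]
    by_cases h : m < L + 1 + w.length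
    · simp [h]
    · rw [if_neg h, if_neg h, ih, if_neg (Nat.succ_ne_zero _)]
      by_cases h0 : ccnt m (L + 1 + w.length) vs = 0
      · simp [h0, jn]
      · rw [if_neg h0, List.take_succ_cons,
          jn_cons w (by
            rw [Ne, List.take_eq_nil_iff]
            push_neg
            exact ⟨h0, ccnt_ne_nil h0⟩)]
        simp
        omega

theorem w_prefix_jn (w : List Char) (vs : List (List Char)) : w <+: jn (w :: vs) := by
  cases vs with
  | nil => simp [jn]
  | cons v vt => exact ⟨'_' :: jn (v :: vt), rfl⟩

theorem bLcp_self_append (w n4 : List Char) : bLcp (w ++ n4) w = w.length := by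
  have := bLcp_append_same w n4 []
  simpa [bLcp_nil_right] using this

theorem bLcp_lt_of_not_prefix {w n3 : List Char} (vs : List (List Char))
    (hw : ¬ w <+: n3) : bLcp n3 (jn (w :: vs)) < w.length := by
  by_contra hle
  exact hw ((prefix_iff_le_bLcp w n3 (jn (w :: vs)) (w_prefix_jn w vs)).mpr (by omega))

theorem matchCnt_eq_ccnt (vs : List (List Char)) : ∀ (n3 : List Char) (L : Nat),
    matchCnt vs n3 = ccnt (L + 1 + bLcp n3 (jn vs)) L vs := by
  induction vs with
  | nil => intro n3 L; simp [matchCnt, ccnt]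
  | cons w vs ih =>
    intro n3 L
    by_cases hw : w <+: n3
    · obtain ⟨n4, rfl⟩ := hw
      rw [matchCnt, if_pos (List.isPrefixOf_iff_prefix.mpr (List.prefix_append w n4)),
        List.drop_left]
      cases vs with
      | nil =>
        rw [show jn [w] = w from rfl, bLcp_self_append, ccnt,
          if_neg (by omega), ccnt]
        split <;> simp [matchCnt]
      | cons v vt =>
        rw [jn_cons w (by simp), bLcp_append_same]
        cases n4 with
        | nil =>
          rw [show bLcp [] ('_' :: jn (v :: vt)) = 0 from rfl]
          rw [ccnt, if_neg (by omega), ccnt, if_pos (by omega)]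
          rfl
        | cons c n5 =>
          by_cases hc : c = '_'
          · subst hc
            rw [show bLcp ('_' :: n5) ('_' :: jn (v :: vt)) = bLcp n5 (jn (v :: vt)) + 1 from by
              simp [bLcp]]
            rw [ccnt, if_neg (by omega)]
            have harith : L + 1 + (w.length + (bLcp n5 (jn (v :: vt)) + 1)) =
                (L + 1 + w.length) + 1 + bLcp n5 (jn (v :: vt)) := by omega
            rw [harith, ← ih n5 (L + 1 + w.length)]
            have hm : (match ('_' :: n5 : List Char) with
              | '_' :: n3 => matchCnt (v :: vt) n3
              | _ => 0) = matchCnt (v :: vt) n5 := rfl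
            rw [hm]
            omega
          · rw [show bLcp (c :: n5) ('_' :: jn (v :: vt)) = 0 from by
              simp [bLcp]; exact fun hh => absurd hh hc]
            rw [ccnt, if_neg (by omega), ccnt, if_pos (by omega)]
            split
            next heq => injection heq with h1 _; exact absurd h1 hc
            next => rfl
    · rw [matchCnt, if_neg (fun hh => hw (List.isPrefixOf_iff_prefix.mp hh)), ccnt,
        if_pos (by have := bLcp_lt_of_not_prefix vs hw; omega)]

-- top-level count: per-name match count from the name's lcp with the whole input
theorem matchCnt_top (w0 : List Char) (rest : List (List Char)) (n : List Char) :
    matchCnt (w0 :: rest) n =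
      if bLcp n (jn (w0 :: rest)) < w0.length then 0
      else ccnt (bLcp n (jn (w0 :: rest))) w0.length rest + 1 := by
  by_cases hw : w0 <+: n
  · obtain ⟨n4, rfl⟩ := hw
    rw [matchCnt, if_pos (List.isPrefixOf_iff_prefix.mpr (List.prefix_append w0 n4)),
      List.drop_left]
    cases rest with
    | nil =>
      rw [show jn [w0] = w0 from rfl, bLcp_self_append, if_neg (by omega), ccnt]
      split <;> simp [matchCnt]
    | cons v vt =>
      rw [jn_cons w0 (by simp), bLcp_append_same, if_neg (by omega)]
      cases n4 with
      | nil =>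
        rw [show bLcp [] ('_' :: jn (v :: vt)) = 0 from rfl, ccnt, if_pos (by omega)]
        rfl
      | cons c n5 =>
        by_cases hc : c = '_'
        · subst hc
          rw [show bLcp ('_' :: n5) ('_' :: jn (v :: vt)) = bLcp n5 (jn (v :: vt)) + 1 from by
            simp [bLcp]]
          have harith : w0.length + (bLcp n5 (jn (v :: vt)) + 1) =
              w0.length + 1 + bLcp n5 (jn (v :: vt)) := by omega
          rw [harith, ← matchCnt_eq_ccnt (v :: vt) n5 w0.length]
          have hm : (match ('_' :: n5 : List Char) with
            | '_' :: n3 => matchCnt (v :: vt) n3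
            | _ => 0) = matchCnt (v :: vt) n5 := rfl
          rw [hm]
          omega
        · rw [show bLcp (c :: n5) ('_' :: jn (v :: vt)) = 0 from by
            simp [bLcp]; exact fun hh => absurd hh hc]
          rw [ccnt, if_pos (by omega)]
          split
          next heq => injection heq with h1 _; exact absurd h1 hc
          next => rfl
  · rw [matchCnt, if_neg (fun hh => hw (List.isPrefixOf_iff_prefix.mp hh)),
      if_pos (bLcp_lt_of_not_prefix rest hw)]

-- once tmp_string stops being a prefix of the name, the inner loop never updates again
theorem innerFold_dead (vs : List (List Char)) : ∀ (n ts : List Char) (t sc : Nat) (ms : List Char),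
    ¬ ts <+: n →
    (vs.foldl (innerStepA n) (t, ts, sc, ms)).2.2 = (sc, ms) := by
  induction vs with
  | nil => intro n ts t sc ms h; rfl
  | cons w vs ih =>
    intro n ts t sc ms h
    rw [List.foldl_cons]
    have hcond : PySem.Chars.startswith n (ts ++ w) = false := by
      rw [PySem.Chars.startswith, Bool.eq_false_iff, Ne, List.isPrefixOf_iff_prefix]
      exact fun hp => h ((List.prefix_append ts w).trans hp)
    simp only [innerStepA, hcond, Bool.false_eq_true, if_false]
    exact ih n (ts ++ w ++ ['_']) (t + 1) sc ms
      (fun hp => h (((List.prefix_append ts w).trans (List.prefix_append (ts ++ w) ['_'])).trans hp))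

-- the inner loop from a still-matching state: its final (counter, best) pair
theorem innerFold_live (vs : List (List Char)) :
    ∀ (n' ts : List Char) (t sc : Nat) (ms : List Char),
    (vs.foldl (innerStepA (ts ++ n')) (t, ts, sc, ms)).2.2 =
      if sc < t + matchCnt vs n' ∧ 1 ≤ matchCnt vs n'
      then (t + matchCnt vs n', ts ++ jn (vs.take (matchCnt vs n')))
      else (sc, ms) := by
  induction vs with
  | nil => intro n' ts t sc ms; simp [matchCnt]
  | cons w vs ih =>
    intro n' ts t sc ms
    rw [List.foldl_cons]
    by_cases hw : w <+: n'
    · obtain ⟨n4, rfl⟩ := hw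
      have hcond : PySem.Chars.startswith (ts ++ (w ++ n4)) (ts ++ w) = true := by
        rw [PySem.Chars.startswith, List.isPrefixOf_iff_prefix]
        exact ⟨n4, by simp⟩
      rw [matchCnt, if_pos (List.isPrefixOf_iff_prefix.mpr (List.prefix_append w n4)),
        List.drop_left]
      cases n4 with
      | cons c n5 =>
        by_cases hc : c = '_'
        · subst hc
          have hm : (match ('_' :: n5 : List Char) with
            | '_' :: n3 => matchCnt vs n3
            | _ => 0) = matchCnt vs n5 := rfl
          rw [hm]
          have hre : ts ++ (w ++ '_' :: n5) = (ts ++ w ++ ['_']) ++ n5 := by simp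
          simp only [innerStepA, hcond, if_true]
          by_cases hsc : sc < t + 1
          · rw [if_pos hsc]
            rw [hre] at *
            rw [ih n5 (ts ++ w ++ ['_']) (t + 1) (t + 1) (ts ++ w)]
            by_cases hk : 1 ≤ matchCnt vs n5
            · have hvs : vs ≠ [] := by
                intro hnil; rw [hnil] at hk; simp [matchCnt] at hk
              have hne : vs.take (matchCnt vs n5) ≠ [] := by
                rw [Ne, List.take_eq_nil_iff]; push_neg; exact ⟨by omega, hvs⟩
              rw [if_pos ⟨by omega, hk⟩, if_pos ⟨by omega, by omega⟩]
              rw [show 1 + matchCnt vs n5 = matchCnt vs n5 + 1 from by omega,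
                List.take_succ_cons, jn_cons w hne]
              refine Prod.ext (by omega) (by simp)
            · have hk0 : matchCnt vs n5 = 0 := by omega
              rw [if_neg (by omega), hk0, if_pos (by omega)]
              rw [List.take_succ_cons, List.take_zero]
              refine Prod.ext (by omega) (by simp [jn])
          · rw [if_neg hsc]
            rw [hre] at *
            rw [ih n5 (ts ++ w ++ ['_']) (t + 1) sc ms]
            by_cases hk : 1 ≤ matchCnt vs n5
            · have hvs : vs ≠ [] := by
                intro hnil; rw [hnil] at hk; simp [matchCnt] at hk
              have hne : vs.take (matchCnt vs n5) ≠ [] := by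
                rw [Ne, List.take_eq_nil_iff]; push_neg; exact ⟨by omega, hvs⟩
              by_cases hsc2 : sc < t + 1 + matchCnt vs n5
              · rw [if_pos ⟨hsc2, hk⟩, if_pos ⟨by omega, by omega⟩]
                rw [show 1 + matchCnt vs n5 = matchCnt vs n5 + 1 from by omega,
                  List.take_succ_cons, jn_cons w hne]
                refine Prod.ext (by omega) (by simp)
              · rw [if_neg (by omega), if_neg (by omega)]
            · rw [if_neg (by omega), if_neg (by omega)]
        · have hm : (match (c :: n5 : List Char) with
            | '_' :: n3 => matchCnt vs n3
            | _ => 0) = 0 := by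
            split
            next heq => injection heq with h1 _; exact absurd h1 hc
            next => rfl
          rw [hm]
          simp only [innerStepA, hcond, if_true]
          have hdead : ¬ (ts ++ w ++ ['_']) <+: ts ++ (w ++ c :: n5) := by
            rw [← List.append_assoc]
            intro hp
            obtain ⟨z, hz⟩ := (List.prefix_append_right_inj (ts ++ w)).mp hp
            rw [List.singleton_append] at hz
            injection hz with h1 _
            exact hc h1.symm
          by_cases hsc : sc < t + 1
          · rw [if_pos hsc, innerFold_dead vs _ _ _ _ _ hdead, if_pos (by omega)]
            rw [show (1 + 0 : Nat) = 0 + 1 from rfl, List.take_succ_cons, List.take_zero]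
            refine Prod.ext (by omega) (by simp [jn])
          · rw [if_neg hsc, innerFold_dead vs _ _ _ _ _ hdead, if_neg (by omega)]
      | nil =>
        have hm : (match ([] : List Char) with
          | '_' :: n3 => matchCnt vs n3
          | _ => 0) = 0 := rfl
        rw [hm]
        simp only [innerStepA, hcond, if_true]
        have hdead : ¬ (ts ++ w ++ ['_']) <+: ts ++ (w ++ []) := by
          rw [List.append_nil]
          intro hp
          have h2 := List.IsPrefix.length_le hp
          simp [List.length_append] at h2
        by_cases hsc : sc < t + 1
        · rw [if_pos hsc, innerFold_dead vs _ _ _ _ _ hdead, if_pos (by omega)]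
          rw [List.take_succ_cons, List.take_zero]
          refine Prod.ext (by omega) (by simp [jn])
        · rw [if_neg hsc, innerFold_dead vs _ _ _ _ _ hdead, if_neg (by omega)]
    · have hcond : PySem.Chars.startswith (ts ++ n') (ts ++ w) = false := by
        rw [PySem.Chars.startswith, Bool.eq_false_iff, Ne, List.isPrefixOf_iff_prefix]
        exact fun hp => hw ((List.prefix_append_right_inj ts).mp hp)
      rw [matchCnt, if_neg (fun hh => hw (List.isPrefixOf_iff_prefix.mp hh))]
      simp only [innerStepA, hcond, Bool.false_eq_true, if_false]
      have hdead : ¬ (ts ++ w ++ ['_']) <+: ts ++ n' := by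
        intro hp
        rw [List.append_assoc] at hp
        exact hw ((List.prefix_append w ['_']).trans ((List.prefix_append_right_inj ts).mp hp))
      rw [innerFold_dead vs _ _ _ _ _ hdead, if_neg (by omega)]

theorem nameStepA_eq (vs : List (List Char)) (n : List Char) (sc : Nat) (ms : List Char) :
    nameStepA vs (sc, ms) n =
      if sc < matchCnt vs n then (matchCnt vs n, jn (vs.take (matchCnt vs n)))
      else (sc, ms) := by
  have h := innerFold_live vs n [] 0 sc ms
  simp only [List.nil_append] at h
  unfold nameStepA
  rw [h]
  split_ifs with h1 h2 h3 <;> first | rfl | omega | exact Prod.ext (by omega) (by simp)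

theorem jn_take_prefix (vs : List (List Char)) : ∀ (k : Nat), jn (vs.take k) <+: jn vs := by
  induction vs with
  | nil => intro k; simp [jn]
  | cons w vs ih =>
    intro k
    cases k with
    | zero => simp [jn]
    | succ j =>
      rw [List.take_succ_cons]
      cases vs with
      | nil => simp [jn]
      | cons v vt =>
        cases hj : (v :: vt).take j with
        | nil => exact ⟨'_' :: jn (v :: vt), rfl⟩
        | cons a t =>
          rw [jn_cons w (by simp), jn_cons w (by simp [hj])]
          obtain ⟨z, hz⟩ := ih j
          rw [hj] at hz
          exact ⟨z, by rw [← hz]; simp [hj]⟩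

-- abbreviation: the per-name count as a function of the lcp value
theorem Gfun_fst (s w0 : List Char) (rest : List (List Char)) (m : Nat) :
    (Gfun s w0 rest m).1 = if m < w0.length then 0 else ccnt m w0.length rest + 1 := by
  unfold Gfun; split <;> rfl

theorem Gfun_fst_mono (s w0 : List Char) (rest : List (List Char)) {m m' : Nat} (h : m ≤ m') :
    (Gfun s w0 rest m).1 ≤ (Gfun s w0 rest m').1 := by
  rw [Gfun_fst, Gfun_fst]
  have := ccnt_mono h w0.length rest
  split_ifs <;> omega

theorem Gfun_eq_of_fst_eq (s w0 : List Char) (rest : List (List Char)) {m m' : Nat}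
    (h : (Gfun s w0 rest m).1 = (Gfun s w0 rest m').1) :
    Gfun s w0 rest m = Gfun s w0 rest m' := by
  rw [Gfun_fst, Gfun_fst] at h
  unfold Gfun
  split_ifs at h ⊢ <;>
    first
      | rfl
      | exact absurd h (by omega)
      | (have hc : ccnt m w0.length rest = ccnt m' w0.length rest := by omega
         rw [bExtend_jn, bExtend_jn, hc])

theorem Gfun_snd_of_pos (s w0 : List Char) (rest : List (List Char)) (m : Nat)
    (hs : s = jn (w0 :: rest)) (h : 1 ≤ (Gfun s w0 rest m).1) :
    (Gfun s w0 rest m).2 = jn ((w0 :: rest).take ((Gfun s w0 rest m).1)) := by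
  have h1 : ¬ m < w0.length := by
    intro hlt; rw [Gfun_fst, if_pos hlt] at h; omega
  rw [Gfun_fst, if_neg h1]
  unfold Gfun
  rw [if_neg h1]
  simp only
  rw [bExtend_jn]
  by_cases h0 : ccnt m w0.length rest = 0
  · rw [if_pos h0, h0, List.take_succ_cons, List.take_zero]
    obtain ⟨z, hz⟩ := w_prefix_jn w0 rest
    rw [hs, ← hz, List.take_left]
    rfl
  · rw [if_neg h0]
    have hne : rest.take (ccnt m w0.length rest) ≠ [] := by
      rw [Ne, List.take_eq_nil_iff]; push_neg; exact ⟨h0, ccnt_ne_nil h0⟩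
    have hp : jn ((w0 :: rest).take (ccnt m w0.length rest + 1)) <+: s := by
      rw [hs]; exact jn_take_prefix (w0 :: rest) _
    have hlen : (jn ((w0 :: rest).take (ccnt m w0.length rest + 1))).length =
        w0.length + 1 + (jn (rest.take (ccnt m w0.length rest))).length := by
      rw [List.take_succ_cons, jn_cons w0 hne]
      simp only [List.length_append, List.length_cons]
      omega
    obtain ⟨z, hz⟩ := hp
    rw [← hz, ← hlen, List.take_left]

theorem maxStepB_eq_max (s : List Char) (m : Nat) (n : List Char) :
    maxStepB s m n = max m (bLcp n s) := by
  simp only [maxStepB]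
  split <;> omega

theorem stepG (s w0 : List Char) (rest : List (List Char)) (hs : s = jn (w0 :: rest))
    (m : Nat) (n : List Char) :
    nameStepA (w0 :: rest) (Gfun s w0 rest m) n = Gfun s w0 rest (max m (bLcp n s)) := by
  have hpair : Gfun s w0 rest m = ((Gfun s w0 rest m).1, (Gfun s w0 rest m).2) := rfl
  rw [hpair, nameStepA_eq]
  have hk : matchCnt (w0 :: rest) n = (Gfun s w0 rest (bLcp n s)).1 := by
    rw [Gfun_fst, matchCnt_top, ← hs]
  rcases Nat.le_total m (bLcp n s) with hle | hle
  · rw [Nat.max_eq_right hle]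
    have hmono := Gfun_fst_mono s w0 rest hle
    by_cases hup : (Gfun s w0 rest m).1 < matchCnt (w0 :: rest) n
    · rw [if_pos hup]
      have hpos : 1 ≤ (Gfun s w0 rest (bLcp n s)).1 := by omega
      refine Prod.ext hk ?_
      rw [Gfun_snd_of_pos s w0 rest (bLcp n s) hs hpos, hk]
    · rw [if_neg hup, ← hpair]
      exact Gfun_eq_of_fst_eq s w0 rest (by omega)
  · rw [Nat.max_eq_left hle]
    have hmono := Gfun_fst_mono s w0 rest hle
    rw [if_neg (by omega), ← hpair]

theorem firstG (s w0 : List Char) (rest : List (List Char)) (hs : s = jn (w0 :: rest))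
    (n : List Char) :
    nameStepA (w0 :: rest) (0, ([] : List Char)) n = Gfun s w0 rest (bLcp n s) := by
  rw [nameStepA_eq]
  have hk : matchCnt (w0 :: rest) n = (Gfun s w0 rest (bLcp n s)).1 := by
    rw [Gfun_fst, matchCnt_top, ← hs]
  by_cases h1 : 0 < matchCnt (w0 :: rest) n
  · rw [if_pos h1]
    refine Prod.ext hk ?_
    rw [Gfun_snd_of_pos s w0 rest (bLcp n s) hs (by omega), hk]
  · rw [if_neg h1]
    have hlt : bLcp n s < w0.length := by
      by_contra hge
      rw [Gfun_fst, if_neg (by omega)] at hk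
      omega
    unfold Gfun
    rw [if_pos hlt]

theorem foldG (s w0 : List Char) (rest : List (List Char)) (hs : s = jn (w0 :: rest))
    (ns : List String) : ∀ (m : Nat),
    ns.foldl (fun acc name => nameStepA (w0 :: rest) acc name.toList) (Gfun s w0 rest m) =
      Gfun s w0 rest (ns.foldl (fun acc name => maxStepB s acc name.toList) m) := by
  induction ns with
  | nil => intro m; rfl
  | cons nm ns ih =>
    intro m
    rw [List.foldl_cons, List.foldl_cons, stepG s w0 rest hs m nm.toList,
      ← maxStepB_eq_max, ih]


-- ===== VERDICT (by name: the statement is the Claim_ definition above) =====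
theorem find_most_similar_name_spec : Claim_equal_find_most_similar_name := by
  intro input_name file_names _
  unfold Spec_find_most_similar_name
  cases hws : sp input_name.toList with
  | nil => exact absurd hws (sp_ne_nil input_name.toList)
  | cons w0 rest =>
    have hs : input_name.toList = jn (w0 :: rest) := by rw [← hws, jn_sp]
    simp only [find_most_similar_name, find_most_similar_name_alt, splitOn_eq_sp, hws,
      List.headI, List.tail_cons]
    cases file_names with
    | nil =>
      simp only [List.foldl_nil]
      by_cases hw0 : 0 < w0.length
      · rw [if_pos hw0]
      · rw [if_neg hw0]
        have hz : bExtend 0 w0.length rest = 0 := by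
          have h0 : w0.length = 0 := by omega
          rw [h0]
          cases rest with
          | nil => rfl
          | cons v vt => rw [bExtend, if_pos (by omega)]
        rw [hz, List.take_zero]
    | cons nm ns =>
      rw [List.foldl_cons, List.foldl_cons,
        show maxStepB input_name.toList 0 nm.toList = bLcp nm.toList input_name.toList from by
          simp only [maxStepB]; split <;> omega,
        firstG input_name.toList w0 rest hs nm.toList,
        foldG input_name.toList w0 rest hs ns (bLcp nm.toList input_name.toList)]
      unfold Gfun
      split
      · rfl
      · rfl
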